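-- pv_equiv track=rewrite | github.com/Gamejoongsa/HeuristicAlgorithm_Challenge3 | agents/onlineDFS.py | delUnable
-- ===== SOURCE A (Python) =====
-- def delUnable(coord, coordList):
--     modifiedCoordList = coordList.copy()
--     checker = [(1,0), (-1, 1), (0, -1)]
--     for i in checker:
--         try:
--             modifiedCoordList.remove((coord[0] + i[0], coord[1] + i[1]))
--         except:
--             pass
--         try:
--             modifiedCoordList.remove((coord[0] - i[0], coord[1] - i[1]))
--         except:
--             pass
--     return modifiedCoordList
-- ===== SOURCE B (Python) =====
-- def delUnable(coord, coordList):
--     x, y = coord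
--     pending = {(x + 1, y), (x - 1, y), (x - 1, y + 1),
--                (x + 1, y - 1), (x, y - 1), (x, y + 1)}
--     result = []
--     for c in coordList:
--         if c in pending:
--             pending.discard(c)
--         else:
--             result.append(c)
--     return result
-- ===== Notes on version B (the rewrite author's own statement) =====
-- stated objective: alternative
-- what changed: Replaces six sequential list.remove scans by precomputing the six forbidden neighbours in a set and doing one pass over coordList, dropping the first occurrence of each forbidden coordinate.
import Mathlib
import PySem

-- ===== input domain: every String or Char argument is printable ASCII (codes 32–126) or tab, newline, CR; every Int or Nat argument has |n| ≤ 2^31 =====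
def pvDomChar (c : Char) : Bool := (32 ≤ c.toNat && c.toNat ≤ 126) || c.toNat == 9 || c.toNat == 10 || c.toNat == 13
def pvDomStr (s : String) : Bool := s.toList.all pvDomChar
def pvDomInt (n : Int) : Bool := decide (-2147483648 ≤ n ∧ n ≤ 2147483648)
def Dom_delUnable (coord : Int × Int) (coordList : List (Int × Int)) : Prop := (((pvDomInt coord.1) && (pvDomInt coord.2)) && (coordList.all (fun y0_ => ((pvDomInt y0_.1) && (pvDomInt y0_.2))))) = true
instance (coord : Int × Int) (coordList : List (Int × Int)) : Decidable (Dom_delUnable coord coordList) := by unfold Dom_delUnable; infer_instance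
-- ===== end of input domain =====

-- B replaces six sequential list.remove scans by one pass over coordList driven by a
-- precomputed set of the six forbidden neighbours (drops only the first occurrence of each).


-- ===== PORT A =====
-- try: modifiedCoordList.remove(v) except: pass
def aTryRemove (xs : List (Int × Int)) (v : Int × Int) : List (Int × Int) :=
  match PySem.List.remove? xs v with
  | some ys => ys
  | none => xs

def delUnable (coord : Int × Int) (coordList : List (Int × Int)) : List (Int × Int) :=
  let checker : List (Int × Int) := [(1, 0), (-1, 1), (0, -1)]
  checker.foldl (fun m i =>
    aTryRemove (aTryRemove m (coord.1 + i.1, coord.2 + i.2)) (coord.1 - i.1, coord.2 - i.2))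
    coordList

-- ===== PORT B =====
-- single pass: skip c (and retire it from pending) on first match, else keep it
def bLoop : List (Int × Int) → PySem.Set (Int × Int) → List (Int × Int)
  | [], _ => []
  | c :: cs, pending =>
      if PySem.Set.contains pending c then bLoop cs (PySem.Set.discard pending c)
      else c :: bLoop cs pending

def delUnable_alt (coord : Int × Int) (coordList : List (Int × Int)) : List (Int × Int) :=
  let x := coord.1
  let y := coord.2
  let pending : PySem.Set (Int × Int) :=
    PySem.Set.ofList [(x + 1, y), (x - 1, y), (x - 1, y + 1), (x + 1, y - 1), (x, y - 1), (x, y + 1)]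
  bLoop coordList pending

-- ===== PRECONDITION & SPEC =====
def Spec_delUnable (coord : Int × Int) (coordList : List (Int × Int)) (out : List (Int × Int)) : Prop := out = delUnable_alt coord coordList
instance (coord : Int × Int) (coordList : List (Int × Int)) (out : List (Int × Int)) : Decidable (Spec_delUnable coord coordList out) := by unfold Spec_delUnable; infer_instance

-- ===== CLAIM (what is proved, stated in full; the proofs are below) =====
def Claim_equal_delUnable : Prop := ∀ (coord : Int × Int) (coordList : List (Int × Int)), Dom_delUnable coord coordList → Spec_delUnable coord coordList (delUnable coord coordList)

-- ===== LEMMAS AND PROOFS =====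

-- first-occurrence erase (total form of Python's list.remove with try/except pass)
def erase1 (v : Int × Int) : List (Int × Int) → List (Int × Int)
  | [] => []
  | x :: xs => if x = v then xs else x :: erase1 v xs

theorem aTryRemove_eq_erase1 (xs : List (Int × Int)) (v : Int × Int) :
    aTryRemove xs v = erase1 v xs := by
  induction xs with
  | nil => rfl
  | cons x xs ih =>
    by_cases h : x = v
    · subst h; simp [aTryRemove, erase1]
    · rw [show erase1 v (x :: xs) = x :: erase1 v xs from by simp [erase1, h], ← ih]
      unfold aTryRemove
      rw [PySem.List.remove?_cons_of_ne xs h]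
      cases PySem.List.remove? xs v <;> rfl

theorem foldl_erase1_nil (P : List (Int × Int)) :
    P.foldl (fun l v => erase1 v l) [] = [] := by
  induction P with
  | nil => rfl
  | cons c P ih => simpa [erase1] using ih

theorem foldl_erase1_cons_not_mem (P : List (Int × Int)) (x : Int × Int) (hx : x ∉ P) :
    ∀ xs, P.foldl (fun l v => erase1 v l) (x :: xs) = x :: P.foldl (fun l v => erase1 v l) xs := by
  induction P with
  | nil => intro xs; rfl
  | cons c P ih =>
    intro xs
    have hxc : x ≠ c := fun h => hx (h ▸ List.mem_cons_self)
    have hP : x ∉ P := fun h => hx (List.mem_cons_of_mem _ h)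
    simp only [List.foldl_cons, erase1, if_neg hxc]
    exact ih hP _

theorem foldl_erase1_cons_mem (P : List (Int × Int)) (x : Int × Int) (hnd : P.Nodup)
    (hx : x ∈ P) :
    ∀ xs, P.foldl (fun l v => erase1 v l) (x :: xs) = (P.erase x).foldl (fun l v => erase1 v l) xs := by
  induction P with
  | nil => cases hx
  | cons c P ih =>
    intro xs
    by_cases hxc : x = c
    · subst hxc
      simp [erase1, List.erase_cons_head]
    · have hxP : x ∈ P := by
        rcases List.mem_cons.mp hx with h | h
        · exact absurd h hxc
        · exact h
      have hnd' : P.Nodup := hnd.of_cons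
      simp only [List.foldl_cons, erase1, if_neg hxc]
      rw [List.erase_cons_tail (by simpa using fun h => hxc h.symm), List.foldl_cons]
      exact ih hnd' hxP _

theorem bLoop_eq_foldl (xs : List (Int × Int)) :
    ∀ P : PySem.Set (Int × Int), P.Nodup →
      bLoop xs P = P.foldl (fun l v => erase1 v l) xs := by
  induction xs with
  | nil => intro P _; simp [bLoop, foldl_erase1_nil]
  | cons c cs ih =>
    intro P hnd
    by_cases hc : c ∈ P
    · rw [bLoop, if_pos (by simpa [PySem.Set.contains_iff] using hc)]
      have hdisc : PySem.Set.discard P c = P.erase c := by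
        rw [hnd.erase_eq_filter]
        simp only [PySem.Set.discard]
        congr 1
      rw [hdisc, ih _ (hnd.erase c), foldl_erase1_cons_mem P c hnd hc]
    · rw [bLoop, if_neg (by simpa [PySem.Set.contains_iff] using hc)]
      rw [ih _ hnd, foldl_erase1_cons_not_mem P c hc]

theorem sixNodup (x y : Int) :
    ([(x + 1, y), (x - 1, y), (x - 1, y + 1), (x + 1, y - 1), (x, y - 1), (x, y + 1)] :
      List (Int × Int)).Nodup := by
  simp [List.nodup_cons, Prod.ext_iff]
  omega

-- ===== VERDICT (by name: the statement is the Claim_ definition above) =====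
theorem delUnable_spec : Claim_equal_delUnable := by
  intro coord coordList _
  unfold Spec_delUnable delUnable delUnable_alt
  have hnd := sixNodup coord.1 coord.2
  simp only []
  rw [bLoop_eq_foldl coordList _ (PySem.Set.nodup_ofList _),
    PySem.Set.ofList_eq_self_of_nodup _ hnd]
  simp only [List.foldl_cons, List.foldl_nil, aTryRemove_eq_erase1]
  ring_nf
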